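-- pv_equiv track=rewrite | github.com/andrei-barinov/programming_tasks | Задачи по программированию/Одномерные массивы/Шарики.py | makeCommonArr
-- ===== SOURCE A (Python) =====
-- def makeCommonArr(arr):
--     temp = 1;
--     arrCommon = [];
--     arrItem = [];
--
--     arrItem.append(arr[0]);
--     arrItem.append(0);
--     arrItem.append(temp);
--     arrCommon.append(arrItem);
--     arrItem = [];
--
--     for i in range(1, len(arr)):
--         if arr[i] == arr[i - 1]:
--             indexEndTmp = i;
--             temp += 1;
--             arrItem.append(arr[i]);
--             arrItem.append(i);
--             arrItem.append(temp);
--             arrCommon.append(arrItem);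
--             arrItem = [];
--         if arr[i] != arr[i - 1]:
--             temp = 1;
--             arrItem.append(arr[i]);
--             arrItem.append(i);
--             arrItem.append(temp);
--             arrCommon.append(arrItem);
--             arrItem = [];
--
--     return arrCommon;
-- ===== SOURCE B (Python) =====
-- def makeCommonArr(arr):
--     # Two-phase re-implementation: run-length group first, then emit
--     # [value, global_index, count_within_run] triples.
--     runs = []  # [value, count] per maximal run, in order
--     for x in arr:
--         if runs and runs[-1][0] == x:
--             runs[-1][1] += 1
--         else:
--             runs.append([x, 1])
--     out = []
--     idx = 0
--     for v, n in runs: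
--         for c in range(1, n + 1):
--             out.append([v, idx, c])
--             idx += 1
--     return out
-- ===== Notes on version B (the rewrite author's own statement) =====
-- stated objective: alternative
-- what changed: A walks indices comparing each element with its predecessor and threads a counter through one indexed loop; B first compresses the array into (value, run-length) pairs and then expands each run with a global index counter in a second phase.
import Mathlib
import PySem

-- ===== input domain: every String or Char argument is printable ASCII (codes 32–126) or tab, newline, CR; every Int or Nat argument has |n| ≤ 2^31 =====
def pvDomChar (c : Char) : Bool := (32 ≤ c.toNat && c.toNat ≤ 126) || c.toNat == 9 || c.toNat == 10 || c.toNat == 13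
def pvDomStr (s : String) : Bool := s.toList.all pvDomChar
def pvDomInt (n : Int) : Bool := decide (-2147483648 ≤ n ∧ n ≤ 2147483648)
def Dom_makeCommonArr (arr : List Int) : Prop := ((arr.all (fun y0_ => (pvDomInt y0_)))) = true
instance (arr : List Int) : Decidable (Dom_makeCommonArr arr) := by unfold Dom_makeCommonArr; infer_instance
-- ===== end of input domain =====

-- B re-implements A's single indexed arr[i]/arr[i-1] scan as a two-phase algorithm
-- (run-length grouping, then expansion with a global index); same cost, different decomposition.

-- ===== PORT A =====
-- body of A's for-loop: state = (arrCommon, temp)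
def aStep (arr : List Int) (st : List (List Int) × Int) (i : Int) : List (List Int) × Int :=
  let ai := (PySem.List.pyGet? arr i).getD 0
  let ap := (PySem.List.pyGet? arr (i - 1)).getD 0
  if ai == ap then (st.1 ++ [[ai, i, st.2 + 1]], st.2 + 1)
  else (st.1 ++ [[ai, i, 1]], 1)

def makeCommonArr (arr : List Int) : List (List Int) :=
  match PySem.List.pyGet? arr 0 with
  | none => []  -- arr[0] raises IndexError; excluded by Pre_
  | some h =>
    ((PySem.List.pyRange 1 (arr.length : Int) 1).foldl (aStep arr) ([[h, 0, 1]], 1)).1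

-- ===== PORT B =====
-- body of B's grouping loop: extend the last run or append a new one
def bStep (rs : List (Int × Int)) (x : Int) : List (Int × Int) :=
  match rs.getLast? with
  | some (v, n) => if v == x then rs.dropLast ++ [(v, n + 1)] else rs ++ [(x, 1)]
  | none => [(x, 1)]

def makeCommonArr_alt (arr : List Int) : List (List Int) :=
  ((arr.foldl bStep []).foldl
    (fun (st : List (List Int) × Int) vn =>
      (PySem.List.pyRange 1 (vn.2 + 1) 1).foldl
        (fun (st : List (List Int) × Int) c => (st.1 ++ [[vn.1, st.2, c]], st.2 + 1)) st)
    ([], 0)).1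

-- ===== PRECONDITION & SPEC =====
-- A unconditionally reads the first element, so it raises IndexError on the empty list.
def Pre_makeCommonArr (arr : List Int) : Prop := arr ≠ []
instance (arr : List Int) : Decidable (Pre_makeCommonArr arr) := by unfold Pre_makeCommonArr; infer_instance
def pvWitness_makeCommonArr : List Int := [1, 1, 2]

def Spec_makeCommonArr (arr : List Int) (out : List (List Int)) : Prop := out = makeCommonArr_alt arr
instance (arr : List Int) (out : List (List Int)) : Decidable (Spec_makeCommonArr arr out) := by unfold Spec_makeCommonArr; infer_instance

-- ===== CLAIM (what is proved, stated in full; the proofs are below) =====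
def Claim_equal_makeCommonArr : Prop := ∀ (arr : List Int), Dom_makeCommonArr arr → Pre_makeCommonArr arr → Spec_makeCommonArr arr (makeCommonArr arr)

-- ===== LEMMAS AND PROOFS =====

-- proof-side mirror of bStep that works at the head of the reversed runs list
def bStepR (rs : List (Int × Int)) (x : Int) : List (Int × Int) :=
  match rs with
  | (v, n) :: t => if v == x then (v, n + 1) :: t else (x, 1) :: (v, n) :: t
  | [] => [(x, 1)]

lemma bStep_eq_reverse (rs : List (Int × Int)) (x : Int) :
    bStep rs x = (bStepR rs.reverse x).reverse := by
  rcases rs.eq_nil_or_concat with rfl | ⟨ys, ⟨v, n⟩, rfl⟩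
  · simp [bStep, bStepR]
  · by_cases hv : v == x
    · simp [bStep, bStepR, hv]
    · simp [bStep, bStepR, hv]

lemma foldl_bStep_eq_reverse (t : List Int) : ∀ (rs : List (Int × Int)),
    t.foldl bStep rs = (t.foldl bStepR rs.reverse).reverse := by
  induction t with
  | nil => intro rs; simp
  | cons y t ih =>
    intro rs
    simp only [List.foldl_cons]
    rw [ih, bStep_eq_reverse, List.reverse_reverse]

-- common reference recursion: remaining elements, given previous value, next index, current run count
def gSpec (prev idx temp : Int) : List Int → List (List Int)
  | [] => []
  | x :: t =>
    if x = prev then [x, idx, temp + 1] :: gSpec x (idx + 1) (temp + 1) t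
    else [x, idx, 1] :: gSpec x (idx + 1) 1 t

lemma aLoop (rest : List Int) : ∀ (pre : List Int) (x : Int) (acc : List (List Int)) (temp : Int),
    ((PySem.List.pyRange ((pre.length : Int) + 1) ((pre.length : Int) + 1 + rest.length) 1).foldl
        (aStep (pre ++ x :: rest)) (acc, temp)).1
      = acc ++ gSpec x ((pre.length : Int) + 1) temp rest := by
  induction rest with
  | nil =>
    intro pre x acc temp
    rw [PySem.List.pyRange_one_eq_nil (by simp)]
    simp [gSpec]
  | cons y t ih =>
    intro pre x acc temp
    have harr : pre ++ x :: y :: t = (pre ++ [x]) ++ y :: t := by simp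
    have hlt : (pre.length : Int) + 1 < (pre.length : Int) + 1 + ((y :: t).length : Int) := by
      simp
    rw [PySem.List.pyRange_one_cons hlt]
    simp only [List.foldl_cons]
    have hai : PySem.List.pyGet? (pre ++ x :: y :: t) ((pre.length : Int) + 1) = some y := by
      rw [harr, show ((pre.length : Int) + 1) = (((pre ++ [x]).length : ℕ) : Int) by
        simp only [List.length_append, List.length_cons, List.length_nil]; push_cast; ring]
      exact PySem.List.pyGet?_append_length _ _ _
    have hap : PySem.List.pyGet? (pre ++ x :: y :: t) ((pre.length : Int) + 1 - 1) = some x := by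
      rw [show ((pre.length : Int) + 1 - 1) = ((pre.length : ℕ) : Int) by ring]
      exact PySem.List.pyGet?_append_length _ _ _
    have hrange : PySem.List.pyRange ((pre.length : Int) + 1 + 1)
          ((pre.length : Int) + 1 + ((y :: t).length : Int)) 1
        = PySem.List.pyRange (((pre ++ [x]).length : Int) + 1)
          (((pre ++ [x]).length : Int) + 1 + (t.length : Int)) 1 := by
      congr 1 <;> simp only [List.length_append, List.length_cons, List.length_nil] <;> push_cast <;> ring
    by_cases hxy : y = x
    · have hstep : aStep (pre ++ x :: y :: t) (acc, temp) ((pre.length : Int) + 1)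
          = (acc ++ [[y, (pre.length : Int) + 1, temp + 1]], temp + 1) := by
        unfold aStep
        rw [hai, hap]
        simp [hxy]
      rw [hstep, hrange, harr, ih]
      simp only [gSpec, if_pos hxy, List.length_append, List.length_cons, List.length_nil,
        Nat.cast_add, Nat.cast_one, Nat.cast_zero]
      simp [List.append_assoc]
    · have hstep : aStep (pre ++ x :: y :: t) (acc, temp) ((pre.length : Int) + 1)
          = (acc ++ [[y, (pre.length : Int) + 1, 1]], 1) := by
        unfold aStep
        rw [hai, hap]
        simp [hxy]
      rw [hstep, hrange, harr, ih]
      simp only [gSpec, if_neg hxy, List.length_append, List.length_cons, List.length_nil,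
        Nat.cast_add, Nat.cast_one, Nat.cast_zero]
      simp [List.append_assoc]

lemma A_eq (x : Int) (t : List Int) : makeCommonArr (x :: t) = [x, 0, 1] :: gSpec x 1 1 t := by
  have h0 : makeCommonArr (x :: t)
      = ((PySem.List.pyRange 1 (((x :: t).length : ℕ) : Int) 1).foldl
          (aStep (x :: t)) ([[x, 0, 1]], 1)).1 := by
    unfold makeCommonArr
    rw [PySem.List.pyGet?_zero_cons]
  rw [h0]
  have h := aLoop t [] x [[x, 0, 1]] 1
  simp only [List.length_nil, Nat.cast_zero, zero_add, List.nil_append] at h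
  rw [show (((x :: t).length : ℕ) : Int) = 1 + (t.length : Int) by
    simp only [List.length_cons]; push_cast; ring]
  rw [h]
  simp

def expandRun (v : Int) (n : ℕ) (idx : Int) : List (List Int) :=
  (List.range n).map (fun c => [v, idx + c, (c : Int) + 1])

def sumT (rs : List (Int × Int)) : Int := ((rs.map (fun p => p.2.toNat)).sum : ℕ)

def emitP : List (Int × Int) → Int → List (List Int)
  | [], _ => []
  | (v, n) :: rs, idx => expandRun v n.toNat idx ++ emitP rs (idx + n.toNat)

lemma expandRun_one (v : Int) (idx : Int) : expandRun v 1 idx = [[v, idx, 1]] := by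
  simp [expandRun, List.range_one]

lemma expandRun_succ (v : Int) (n : ℕ) (idx : Int) :
    expandRun v (n + 1) idx = expandRun v n idx ++ [[v, idx + n, (n : Int) + 1]] := by
  simp [expandRun, List.range_succ]

lemma innerFold (n : ℕ) (v : Int) : ∀ (acc : List (List Int)) (idx : Int),
    ((PySem.List.pyRange 1 ((n : Int) + 1) 1).foldl
        (fun (st : List (List Int) × Int) c => (st.1 ++ [[v, st.2, c]], st.2 + 1)) (acc, idx))
      = (acc ++ expandRun v n idx, idx + n) := by
    induction n with
  | zero => intro acc idx; simp [PySem.List.pyRange_one_eq_nil, expandRun]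
  | succ m ih =>
    intro acc idx
    have : PySem.List.pyRange 1 (((m + 1 : ℕ) : Int) + 1) 1
        = PySem.List.pyRange 1 ((m : Int) + 1) 1 ++ [(m : Int) + 1] := by
      push_cast
      rw [PySem.List.pyRange_one_succ_right (by omega)]
    rw [this, List.foldl_append, ih, expandRun_succ]
    simp only [List.foldl_cons, List.foldl_nil, List.append_assoc]
    rw [Prod.mk.injEq]
    exact ⟨rfl, by push_cast; ring⟩

lemma eFold (runs : List (Int × Int)) : ∀ (acc : List (List Int)) (idx : Int),
    (∀ p ∈ runs, 0 ≤ p.2) →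
    (runs.foldl
        (fun (st : List (List Int) × Int) vn =>
          (PySem.List.pyRange 1 (vn.2 + 1) 1).foldl
            (fun (st : List (List Int) × Int) c => (st.1 ++ [[vn.1, st.2, c]], st.2 + 1)) st)
        (acc, idx))
      = (acc ++ emitP runs idx, idx + sumT runs) := by
    induction runs with
  | nil => intro acc idx _; simp [emitP, sumT]
  | cons q rs ih =>
    intro acc idx h
    obtain ⟨v, n⟩ := q
    have hn : 0 ≤ n := h ⟨v, n⟩ (by simp)
    have hcast : n + 1 = ((n.toNat : ℕ) : Int) + 1 := by omega
    simp only [List.foldl_cons]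
    rw [hcast, innerFold, ih _ _ (fun p hp => h p (by simp [hp]))]
    simp only [emitP, sumT, List.map_cons, List.sum_cons, List.append_assoc]
    rw [Prod.mk.injEq]
    exact ⟨rfl, by push_cast; ring⟩

lemma bStep_pos (t : List Int) : ∀ (rs : List (Int × Int)), (∀ p ∈ rs, 1 ≤ p.2) →
    ∀ p ∈ t.foldl bStepR rs, 1 ≤ p.2 := by
    induction t with
  | nil => intro rs h; simpa using h
  | cons y t ih =>
    intro rs h
    simp only [List.foldl_cons]
    apply ih
    intro p hp
    unfold bStepR at hp
    cases rs with
    | nil => simp at hp; simp [hp]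
    | cons q qs =>
      obtain ⟨v, n⟩ := q
      by_cases hv : v == y
      · simp [hv] at hp
        rcases hp with h1 | h2
        · have := h ⟨v, n⟩ (by simp); simp [h1]; omega
        · exact h p (by simp [h2])
      · simp [hv] at hp
        rcases hp with h1 | h2 | h3
        · simp [h1]
        · exact h p (by simp [h2])
        · exact h p (by simp [h3])

lemma emitP_append_singleton (l : List (Int × Int)) : ∀ (v c : Int) (idx : Int),
    emitP (l ++ [(v, c)]) idx = emitP l idx ++ expandRun v c.toNat (idx + sumT l) := by
    induction l with
  | nil => intro v c idx; simp [emitP, sumT]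
  | cons q l ih =>
    intro v c idx
    obtain ⟨w, m⟩ := q
    simp only [List.cons_append, emitP, ih, sumT, List.map_cons, List.sum_cons]
    rw [List.append_assoc]
    congr 3
    push_cast
    ring

lemma sumT_reverse (rs : List (Int × Int)) : sumT rs.reverse = sumT rs := by
  simp [sumT, List.map_reverse, List.sum_reverse]

lemma sumT_cons (v c : Int) (rs : List (Int × Int)) :
    sumT ((v, c) :: rs) = (c.toNat : Int) + sumT rs := by
  simp [sumT]

lemma bMain (t : List Int) : ∀ (v : Int) (k : ℕ) (rs : List (Int × Int)) (idx : Int),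
    emitP ((t.foldl bStepR ((v, (k : Int) + 1) :: rs)).reverse) idx
      = emitP rs.reverse idx ++ expandRun v (k + 1) (idx + sumT rs)
          ++ gSpec v (idx + sumT rs + k + 1) ((k : Int) + 1) t := by
  induction t with
  | nil =>
    intro v k rs idx
    simp only [List.foldl_nil, List.reverse_cons]
    rw [emitP_append_singleton, sumT_reverse]
    simp only [gSpec, List.append_nil]
    congr 2
  | cons y t ih =>
    intro v k rs idx
    simp only [List.foldl_cons]
    by_cases hv : v = y
    · subst hv
      have hstep : bStepR ((v, (k : Int) + 1) :: rs) v = (v, ((k + 1 : ℕ) : Int) + 1) :: rs := by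
        simp only [bStepR, BEq.rfl, if_pos]
        push_cast
        ring_nf
      rw [hstep, ih, expandRun_succ v (k + 1) (idx + sumT rs)]
      simp only [gSpec, List.append_assoc, List.singleton_append]
      push_cast
      ring_nf
    · have hstep : bStepR ((v, (k : Int) + 1) :: rs) y = (y, ((0 : ℕ) : Int) + 1) :: (v, (k : Int) + 1) :: rs := by
        simp [bStepR, hv]
      rw [hstep, ih]
      simp only [List.reverse_cons]
      rw [emitP_append_singleton, sumT_reverse, sumT_cons]
      rw [show (((k : Int) + 1).toNat : Int) = (k : Int) + 1 by omega,
          show ((k : Int) + 1).toNat = k + 1 by omega]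
      rw [expandRun_one]
      simp only [gSpec, if_neg (Ne.symm hv), List.append_assoc, List.singleton_append]
      push_cast
      ring_nf

lemma B_eq (x : Int) (t : List Int) : makeCommonArr_alt (x :: t) = [x, 0, 1] :: gSpec x 1 1 t := by
  unfold makeCommonArr_alt
  rw [foldl_bStep_eq_reverse, List.reverse_nil]
  have hpos := bStep_pos (x :: t) [] (by simp)
  rw [eFold _ _ _ (fun p hp => le_of_lt (by
    have := hpos p (List.mem_reverse.mp hp)
    omega))]
  simp only [List.nil_append]
  have hfold : (x :: t).foldl bStepR [] = t.foldl bStepR ((x, ((0 : ℕ) : Int) + 1) :: []) := by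
    simp [bStepR]
  rw [hfold, bMain]
  simp [sumT, emitP, expandRun, List.range_one]

-- ===== VERDICT (by name: the statement is the Claim_ definition above) =====
theorem makeCommonArr_spec : Claim_equal_makeCommonArr := by
  intro arr _ hpre
  unfold Spec_makeCommonArr
  cases arr with
  | nil => exact absurd rfl hpre
  | cons x t => rw [A_eq, B_eq]
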